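-- pv_equiv track=rewrite | github.com/rendermotion/RMPY | rig/rigCorrectives.py | right_list
-- ===== SOURCE A (Python) =====
-- def right_list(list_objects):
--     """
--         swithchs the token L to R in any given list of objects.
--
--     """
--     result = []
--     for each in list_objects:
--         tokens = each.split('_')
--         for index, each_token in enumerate(tokens):
--             if each_token == 'L':
--                 tokens[index] = 'R'
--         result.append('_'.join(tokens))
--     return result
-- ===== SOURCE B (Python) =====
-- def right_list(list_objects):
--     """Single left-to-right character scan per string: no split/join,
--     tokens are flushed at each underscore ('L' -> 'R')."""
--     out = []
--     for each in list_objects: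
--         res = []
--         cur = []
--         for ch in each:
--             if ch == '_':
--                 res.extend(['R'] if cur == ['L'] else cur)
--                 res.append('_')
--                 cur = []
--             else:
--                 cur.append(ch)
--         res.extend(['R'] if cur == ['L'] else cur)
--         out.append(''.join(res))
--     return out
-- ===== Notes on version B (the rewrite author's own statement) =====
-- stated objective: alternative
-- what changed: Replaces the split('_')/enumerate-mutate/join pipeline with a single character scan per string that emits tokens in place, flushing each underscore-delimited token ('L' becomes 'R') without ever building a token list.
import Mathlib
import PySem

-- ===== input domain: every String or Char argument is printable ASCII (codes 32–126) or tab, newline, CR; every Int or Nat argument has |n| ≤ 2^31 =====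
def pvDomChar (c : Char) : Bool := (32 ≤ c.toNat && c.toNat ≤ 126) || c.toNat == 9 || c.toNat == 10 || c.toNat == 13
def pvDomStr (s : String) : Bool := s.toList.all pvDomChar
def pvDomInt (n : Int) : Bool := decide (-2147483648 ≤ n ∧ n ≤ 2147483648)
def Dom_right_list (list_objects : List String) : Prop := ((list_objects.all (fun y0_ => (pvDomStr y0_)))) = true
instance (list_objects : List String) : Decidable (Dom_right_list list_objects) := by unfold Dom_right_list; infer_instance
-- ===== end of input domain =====

-- B replaces A's split/enumerate-mutate/join pipeline by one character scan per string
-- that flushes each underscore-delimited token in place ('L' -> 'R'): alternative structure, same cost.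

-- ===== PORT A =====
def right_list (list_objects : List String) : List String :=
  list_objects.foldl (fun result each =>
    -- each.split('_'): sep "_" is nonempty so Str.split? is always `some`
    let tokens := (PySem.Str.split? each "_").getD []
    -- for index, each_token in enumerate(tokens): if each_token == 'L': tokens[index] = 'R'
    let tokens := (PySem.List.enumerate tokens).foldl
      (fun ts p => if p.2 = "L" then ts.set p.1.toNat "R" else ts) tokens
    result ++ [PySem.Str.join "_" tokens]) []

-- ===== PORT B =====
-- flush of the current token: ['R'] if cur == ['L'] else cur
def flushTok (cur : List Char) : List Char := if cur = ['L'] then ['R'] else cur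

-- the inner character loop of Source B: res, cur are the two accumulators
def scanTokens : List Char → List Char → List Char → List Char
  | [], res, cur => res ++ flushTok cur
  | c :: rest, res, cur =>
    if c = '_' then scanTokens rest (res ++ flushTok cur ++ ['_']) []
    else scanTokens rest res (cur ++ [c])

def right_list_alt (list_objects : List String) : List String :=
  list_objects.map (fun each => String.ofList (scanTokens each.toList [] []))

-- ===== PRECONDITION & SPEC =====
def Spec_right_list (list_objects : List String) (out : List String) : Prop := out = right_list_alt list_objects
instance (list_objects : List String) (out : List String) : Decidable (Spec_right_list list_objects out) := by unfold Spec_right_list; infer_instance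

-- ===== CLAIM (what is proved, stated in full; the proofs are below) =====
def Claim_equal_right_list : Prop := ∀ (list_objects : List String), Dom_right_list list_objects → Spec_right_list list_objects (right_list list_objects)

-- ===== LEMMAS AND PROOFS =====

-- structural characterisation of splitting on a single '_' character
def splitU : List Char → List (List Char)
  | [] => [[]]
  | c :: rest => if c = '_' then [] :: splitU rest else (splitU rest).modifyHead (c :: ·)

theorem splitU_ne_nil (cs : List Char) : splitU cs ≠ [] := by
  induction cs with
  | nil => simp [splitU]
  | cons c rest ih =>
    simp only [splitU]
    split_ifs
    · simp
    · cases h : splitU rest with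
      | nil => exact absurd h ih
      | cons a t => simp

theorem go_eq : ∀ (l : List Char) (fuel : Nat) (cur : List Char) (acc : List (List Char)),
    l.length ≤ fuel →
    PySem.Chars.splitOn.go ['_'] fuel l cur acc
      = acc.reverse ++ (splitU l).modifyHead (cur.reverse ++ ·) := by
  intro l
  induction l with
  | nil =>
    intro fuel cur acc _
    cases fuel <;> simp [PySem.Chars.splitOn.go, splitU]
  | cons c rest ih =>
    intro fuel cur acc h
    cases fuel with
    | zero => simp at h
    | succ f =>
      simp only [PySem.Chars.splitOn.go]
      by_cases hc : c = '_'
      · subst hc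
        rw [if_pos (by simp [List.isPrefixOf])]
        simp only [List.length_cons, List.length_nil, List.drop_succ_cons, List.drop_zero]
        rw [ih f [] (cur.reverse :: acc) (by simpa using Nat.le_of_succ_le_succ h)]
        simp only [splitU, if_pos rfl, List.reverse_cons, List.append_assoc,
          List.singleton_append, List.modifyHead]
        cases hsp : splitU rest <;> simp [List.modifyHead]
      · rw [if_neg (by simp [List.isPrefixOf, hc]; exact fun h' => hc h'.symm)]
        rw [ih f (c :: cur) acc (by simpa using Nat.le_of_succ_le_succ h)]
        rcases hsp : splitU rest with _ | ⟨a, t⟩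
        · exact absurd hsp (splitU_ne_nil rest)
        · simp [splitU, hc, hsp, List.modifyHead]

theorem splitOn_eq_splitU (cs : List Char) :
    PySem.Chars.splitOn cs ['_'] = splitU cs := by
  unfold PySem.Chars.splitOn
  rw [go_eq cs (cs.length + 1) [] [] (by omega)]
  rcases hsp : splitU cs with _ | ⟨a, t⟩
  · exact absurd hsp (splitU_ne_nil cs)
  · simp [List.modifyHead]

-- A's enumerate-and-set loop is the map replacing "L" by "R"
theorem loopA_eq : ∀ (l : List String) (n : Nat) (ts : List String), ts.drop n = l →
    (PySem.List.enumerate l (n : Int)).foldl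
        (fun ts p => if p.2 = "L" then ts.set p.1.toNat "R" else ts) ts
      = ts.take n ++ l.map (fun t => if t = "L" then "R" else t) := by
  intro l
  induction l with
  | nil =>
    intro n ts h
    have hle : ts.length ≤ n := List.drop_eq_nil_iff.mp h
    simp [PySem.List.enumerate, List.take_of_length_le hle]
  | cons x l ih =>
    intro n ts h
    have hn : n < ts.length := by
      by_contra hge
      rw [List.drop_eq_nil_of_le (by omega)] at h
      exact List.cons_ne_nil x l h.symm
    have hx : ts[n] = x := by
      have := List.getElem_drop (xs := ts) (i := n) (j := 0) (h := by simpa [h])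
      simpa [h] using this.symm
    rw [PySem.List.enumerate_cons]
    simp only [List.foldl_cons]
    by_cases hL : x = "L"
    · rw [if_pos (by simpa [hL])]
      have hcast : ((n : Int)).toNat = n := by simp
      rw [hcast]
      have hdrop : (ts.set n "R").drop (n + 1) = l := by
        rw [List.drop_set_of_lt, List.drop_add_one_eq_tail_drop, h]
        · rfl
        · omega
      have := ih (n + 1) (ts.set n "R") hdrop
      rw [show ((n : Int) + 1) = ((n + 1 : Nat) : Int) by push_cast; ring, this]
      rw [List.take_add_one, List.getElem?_set_self (by simpa using hn)]
      have hset : (ts.take n).set n "R" = ts.take n :=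
        List.set_eq_of_length_le (by simp [Nat.min_le_left])
      simp [List.take_set, hL, hset]
    · rw [if_neg (by simpa [hx] using hL)]
      have hdrop : ts.drop (n + 1) = l := by
        rw [List.drop_add_one_eq_tail_drop, h]; rfl
      have := ih (n + 1) ts hdrop
      rw [show ((n : Int) + 1) = ((n + 1 : Nat) : Int) by push_cast; ring, this]
      rw [List.take_add_one, List.getElem?_eq_getElem hn, hx]
      simp [hL]

-- B's scan equals join of the flushed tokens of splitU
theorem scan_eq : ∀ (cs res cur : List Char),
    scanTokens cs res cur
      = res ++ PySem.Chars.join ['_'] (((splitU cs).modifyHead (cur ++ ·)).map flushTok) := by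
  intro cs
  induction cs with
  | nil => intro res cur; simp [scanTokens, splitU, List.modifyHead, PySem.Chars.join_singleton]
  | cons c rest ih =>
    intro res cur
    simp only [scanTokens]
    by_cases hc : c = '_'
    · rw [if_pos hc, ih]
      rcases hsp : splitU rest with _ | ⟨a, t⟩
      · exact absurd hsp (splitU_ne_nil rest)
      · subst hc
        simp [splitU, hsp, List.modifyHead, PySem.Chars.join_cons_cons]
    · rw [if_neg hc, ih]
      rcases hsp : splitU rest with _ | ⟨a, t⟩
      · exact absurd hsp (splitU_ne_nil rest)
      · simp [splitU, hc, hsp, List.modifyHead]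

theorem str_eq_L_iff (t : String) : (t = "L") ↔ (t.toList = ['L']) := by
  rw [← String.toList_inj]; rfl

-- per-string agreement
theorem per_string (each : String) :
    PySem.Str.join "_"
        ((PySem.List.enumerate ((PySem.Str.split? each "_").getD [])).foldl
          (fun ts p => if p.2 = "L" then ts.set p.1.toNat "R" else ts)
          ((PySem.Str.split? each "_").getD []))
      = String.ofList (scanTokens each.toList [] []) := by
  have hsp := PySem.Str.split?_map each "_"
  rcases hopt : PySem.Str.split? each "_" with _ | ts
  · rw [hopt] at hsp
    simp [PySem.Chars.split?] at hsp
  · rw [hopt] at hsp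
    simp only [Option.map_some, PySem.Chars.split?] at hsp
    rw [if_neg (by simp)] at hsp
    have hts : ts.map String.toList = splitU each.toList := by
      rw [← splitOn_eq_splitU]; exact Option.some.inj hsp
    have key : (PySem.Str.join "_" (ts.map (fun t => if t = "L" then "R" else t))).toList
        = scanTokens each.toList [] [] := by
      rw [PySem.Str.toList_join, scan_eq]
      have hmod : (splitU each.toList).modifyHead (fun x => [] ++ x) = splitU each.toList := by
        rcases hsp2 : splitU each.toList with _ | ⟨a, t⟩
        · rfl
        · simp [List.modifyHead]
      rw [hmod, ← hts]
      simp only [List.map_map, List.nil_append]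
      rw [show ("_" : String).toList = ['_'] from rfl]
      congr 1
      apply List.map_congr_left
      intro t _
      by_cases hL : t = "L"
      · simp [hL, flushTok, Function.comp]
      · have : t.toList ≠ ['L'] := fun h => hL ((str_eq_L_iff t).mpr h)
        simp [hL, flushTok, Function.comp, this]
    simp only [Option.getD_some]
    have h0 := loopA_eq ts 0 ts (by simp)
    simp only [Nat.cast_zero] at h0
    rw [h0]
    simp only [List.take_zero, List.nil_append]
    rw [← key, String.ofList_toList]

theorem foldl_append_map {α β : Type} (g : α → β) :
    ∀ (l : List α) (acc : List β),
      l.foldl (fun r e => r ++ [g e]) acc = acc ++ l.map g := by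
  intro l
  induction l with
  | nil => intro acc; simp
  | cons x l ih => intro acc; simp [ih]

-- ===== VERDICT (by name: the statement is the Claim_ definition above) =====
theorem right_list_spec : Claim_equal_right_list := by
  intro list_objects _
  unfold Spec_right_list right_list right_list_alt
  rw [foldl_append_map]
  simp only [List.nil_append]
  congr 1
  funext each
  exact per_string each
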